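-- pv_equiv track=rewrite | github.com/martimsoutooo/CD | SudokuSolver/sudoku_solver.py | get_available_numbers
-- ===== SOURCE A (Python) =====
-- def get_available_numbers(subgrid):
--     used_numbers = set()
--     for row in subgrid:
--         for num in row:
--             if num != 0:
--                 used_numbers.add(num)
--     available_numbers = set(range(1, 10)) - used_numbers
--     return available_numbers
-- ===== SOURCE B (Python) =====
-- def get_available_numbers(subgrid):
--     return {n for n in range(1, 10) if not any(n in row for row in subgrid)}
-- ===== Notes on version B (the rewrite author's own statement) =====
-- stated objective: alternative
-- what changed: Instead of collecting the used numbers into a set and subtracting, B iterates over the candidates 1..9 and keeps each one only if no row of the subgrid contains it (candidates outer, cells inner).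
import Mathlib
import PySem

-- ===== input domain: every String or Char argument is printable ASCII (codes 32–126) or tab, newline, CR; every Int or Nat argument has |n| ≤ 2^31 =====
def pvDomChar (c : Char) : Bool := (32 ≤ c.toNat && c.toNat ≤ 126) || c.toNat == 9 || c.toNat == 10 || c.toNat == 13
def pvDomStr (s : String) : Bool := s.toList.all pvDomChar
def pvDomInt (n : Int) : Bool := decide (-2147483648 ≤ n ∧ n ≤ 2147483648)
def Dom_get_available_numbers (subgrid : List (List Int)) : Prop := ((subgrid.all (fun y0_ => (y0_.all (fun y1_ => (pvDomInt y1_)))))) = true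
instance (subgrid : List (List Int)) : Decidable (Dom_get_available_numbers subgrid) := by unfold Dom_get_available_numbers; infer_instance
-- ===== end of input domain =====

-- B inverts the traversal: instead of collecting used numbers and subtracting, it keeps each
-- candidate 1..9 that appears in no row (objective: simpler). Return value compared as a set.

-- ===== PORT A =====
-- A-side helper: the used_numbers accumulation loop
def pv_used (subgrid : List (List Int)) : PySem.Set Int :=
  subgrid.foldl (fun s row =>
    row.foldl (fun s num => if num ≠ 0 then PySem.Set.add s num else s) s)
    PySem.Set.empty

def get_available_numbers (subgrid : List (List Int)) : List Int :=
  PySem.Set.diff (PySem.Set.ofList (PySem.List.pyRange 1 10 1)) (pv_used subgrid)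

-- ===== PORT B =====
def get_available_numbers_alt (subgrid : List (List Int)) : List Int :=
  PySem.Set.ofList ((PySem.List.pyRange 1 10 1).filter
    (fun n => ¬ (subgrid.any (fun row => row.contains n))))

-- ===== PRECONDITION & SPEC =====
def Spec_get_available_numbers (subgrid : List (List Int)) (out : List Int) : Prop := out = get_available_numbers_alt subgrid
instance (subgrid : List (List Int)) (out : List Int) : Decidable (Spec_get_available_numbers subgrid out) := by unfold Spec_get_available_numbers; infer_instance

-- ===== CLAIM (what is proved, stated in full; the proofs are below) =====
def Claim_equal_get_available_numbers : Prop := ∀ (subgrid : List (List Int)), Dom_get_available_numbers subgrid → Spec_get_available_numbers subgrid (get_available_numbers subgrid)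

-- ===== LEMMAS AND PROOFS =====

-- membership in the inner fold over one row
theorem pv_mem_row_fold (row : List Int) (s : PySem.Set Int) (n : Int) :
    n ∈ row.foldl (fun s num => if num ≠ 0 then PySem.Set.add s num else s) s ↔
      n ∈ s ∨ (n ≠ 0 ∧ n ∈ row) := by
  induction row generalizing s with
  | nil => simp
  | cons x xs ih =>
    simp only [List.foldl_cons, ih]
    by_cases hx : x = 0
    · rw [if_neg (by simp [hx])]
      simp only [List.mem_cons, hx]
      tauto
    · rw [if_pos hx]
      simp only [PySem.Set.mem_add, List.mem_cons]
      by_cases hnx : n = x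
      · subst hnx
        simp only [true_or, and_true, ne_eq, hx, not_false_iff]
        tauto
      · simp only [hnx, false_or]
        tauto

-- membership in A's used-numbers set
theorem pv_mem_used (subgrid : List (List Int)) (n : Int) :
    n ∈ pv_used subgrid ↔ (n ≠ 0 ∧ ∃ row ∈ subgrid, n ∈ row) := by
  have key : ∀ (gs : List (List Int)) (s : PySem.Set Int),
      n ∈ gs.foldl (fun s row =>
        row.foldl (fun s num => if num ≠ 0 then PySem.Set.add s num else s) s) s ↔
      n ∈ s ∨ (n ≠ 0 ∧ ∃ row ∈ gs, n ∈ row) := by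
    intro gs
    induction gs with
    | nil => simp
    | cons r rs ih =>
      intro s
      simp only [List.foldl_cons, ih, pv_mem_row_fold, List.mem_cons]
      constructor
      · rintro ((h | ⟨h0, hr⟩) | ⟨h0, row, hrow, hm⟩)
        · exact Or.inl h
        · exact Or.inr ⟨h0, r, Or.inl rfl, hr⟩
        · exact Or.inr ⟨h0, row, Or.inr hrow, hm⟩
      · rintro (h | ⟨h0, row, (rfl | hrow), hm⟩)
        · exact Or.inl (Or.inl h)
        · exact Or.inl (Or.inr ⟨h0, hm⟩)
        · exact Or.inr ⟨h0, row, hrow, hm⟩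
  rw [pv_used, key]
  simp [PySem.Set.empty]

-- Set.ofList of a Nodup list is the list itself
theorem pv_ofList_nodup (l : List Int) (h : l.Nodup) : PySem.Set.ofList l = l := by
  have key : ∀ (l s : List Int), (∀ x ∈ l, x ∉ s) → l.Nodup →
      l.foldl PySem.Set.add s = s ++ l := by
    intro l
    induction l with
    | nil => simp
    | cons x xs ih =>
      intro s hdisj hnd
      have hxns : x ∉ s := hdisj x (by simp)
      have hadd : PySem.Set.add s x = s ++ [x] := by
        simp [PySem.Set.add, PySem.Set.contains, hxns]
      rw [List.foldl_cons, hadd, ih (s ++ [x])]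
      · simp
      · intro y hy
        simp only [List.mem_append, List.mem_singleton]
        rintro (h1 | rfl)
        · exact hdisj y (by simp [hy]) h1
        · exact (List.nodup_cons.mp hnd).1 hy
      · exact (List.nodup_cons.mp hnd).2
  have := key l [] (by simp) h
  simpa [PySem.Set.ofList_eq_foldl] using this

theorem pv_range_lit : PySem.List.pyRange 1 10 1 = [1, 2, 3, 4, 5, 6, 7, 8, 9] := by decide

-- ===== VERDICT (by name: the statement is the Claim_ definition above) =====
theorem get_available_numbers_spec : Claim_equal_get_available_numbers := by
  intro subgrid _
  unfold Spec_get_available_numbers get_available_numbers get_available_numbers_alt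
  rw [pv_range_lit]
  have hnd : ([1, 2, 3, 4, 5, 6, 7, 8, 9] : List Int).Nodup := by decide
  rw [pv_ofList_nodup _ hnd]
  rw [pv_ofList_nodup _ (List.Nodup.filter _ hnd)]
  unfold PySem.Set.diff
  apply List.filter_congr
  intro n hn
  have hn0 : n ≠ 0 := by
    simp only [List.mem_cons, List.not_mem_nil, or_false] at hn
    rcases hn with rfl|rfl|rfl|rfl|rfl|rfl|rfl|rfl|rfl <;> decide
  rw [Bool.eq_iff_iff]
  simp [PySem.Set.contains, pv_mem_used, hn0, List.any_eq_true]
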